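-- pv_equiv track=rewrite | github.com/lenardflx/EiP1_Excersises | Klausurübungen/Altklausur.py | add_umlaut
-- ===== SOURCE A (Python) =====
-- def add_umlaut(text):
--     out = ""
--     repl = {"a":"ä","o":"ö","u":"ü","A":"Ä","O":"Ö","U":"Ü"}
--     counter = 0
--     for chr in text:
--         if chr == " ":
--             counter = 0
--         if chr in repl:
--             counter += 1
--             if counter == 2:
--                 out += repl[chr]
--                 continue
--         out += chr
--     return out
-- ===== SOURCE B (Python) =====
-- def add_umlaut(text):
--     repl = {"a": "ä", "o": "ö", "u": "ü", "A": "Ä", "O": "Ö", "U": "Ü"}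
--
--     def fix(word):
--         idxs = [i for i, c in enumerate(word) if c in repl]
--         if len(idxs) < 2:
--             return word
--         i = idxs[1]
--         return word[:i] + repl[word[i]] + word[i + 1:]
--
--     return " ".join(fix(word) for word in text.split(" "))
-- ===== Notes on version B (the rewrite author's own statement) =====
-- stated objective: alternative
-- what changed: Replaces the streaming character loop with a running vowel counter by a word-split decomposition: split on the literal space, locate the vowel positions per word, replace the character at the second position by slicing, and rejoin with spaces.
import Mathlib
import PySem

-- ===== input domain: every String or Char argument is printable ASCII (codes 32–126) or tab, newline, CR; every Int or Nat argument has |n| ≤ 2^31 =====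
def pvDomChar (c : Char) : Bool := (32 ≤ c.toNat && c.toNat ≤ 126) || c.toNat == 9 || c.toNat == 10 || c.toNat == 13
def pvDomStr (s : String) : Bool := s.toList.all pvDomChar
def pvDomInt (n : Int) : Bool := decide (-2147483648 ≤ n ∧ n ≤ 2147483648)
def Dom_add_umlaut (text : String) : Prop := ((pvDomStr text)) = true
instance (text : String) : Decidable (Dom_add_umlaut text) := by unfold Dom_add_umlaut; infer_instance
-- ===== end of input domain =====

-- B replaces A's streaming loop with a running vowel counter by a word-split
-- decomposition (split on " ", replace the second vowel per word by slicing, rejoin);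
-- same cost, a genuinely different traversal ("alternative").

-- ===== PORT A =====
def pvReplA : PySem.Dict Char Char :=
  PySem.Dict.ofList [('a', 'ä'), ('o', 'ö'), ('u', 'ü'), ('A', 'Ä'), ('O', 'Ö'), ('U', 'Ü')]

-- one iteration of A's for-loop over (out, counter)
def pvStepA (st : List Char × Int) (c : Char) : List Char × Int :=
  let counter : Int := if c = ' ' then 0 else st.2
  match pvReplA.get? c with
  | some v =>
      let counter := counter + 1
      if counter = 2 then (st.1 ++ [v], counter) else (st.1 ++ [c], counter)
  | none => (st.1 ++ [c], counter)

def add_umlaut (text : String) : String :=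
  String.ofList (text.toList.foldl pvStepA ([], 0)).1

-- ===== PORT B =====
def pvReplB : PySem.Dict Char Char :=
  PySem.Dict.ofList [('a', 'ä'), ('o', 'ö'), ('u', 'ü'), ('A', 'Ä'), ('O', 'Ö'), ('U', 'Ü')]

-- fix(word): replace the character at the second vowel index, if any
def pvFixB (w : List Char) : List Char :=
  let idxs := ((PySem.List.enumerate w 0).filter (fun p => (pvReplB.get? p.2).isSome)).map (·.1)
  if idxs.length < 2 then w
  else
    match PySem.List.pyGet? idxs 1 with        -- idxs[1]; in range since len(idxs) ≥ 2
    | none => w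
    | some i =>
      match PySem.List.pyGet? w i with          -- word[i]; i is a valid index of w
      | none => w
      | some ci =>
        match pvReplB.get? ci with              -- repl[word[i]]; ci is a vowel
        | none => w
        | some v =>
            PySem.List.slice w none (some i) ++ [v] ++ PySem.List.slice w (some (i + 1)) none

def add_umlaut_alt (text : String) : String :=
  match PySem.Str.split? text " " with          -- text.split(" "); sep ≠ "" so never none
  | none => ""
  | some words => PySem.Str.join " " (words.map (fun w => String.ofList (pvFixB w.toList)))

-- ===== PRECONDITION & SPEC =====
def Spec_add_umlaut (text : String) (out : String) : Prop := out = add_umlaut_alt text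
instance (text : String) (out : String) : Decidable (Spec_add_umlaut text out) := by unfold Spec_add_umlaut; infer_instance

-- ===== CLAIM (what is proved, stated in full; the proofs are below) =====
def Claim_equal_add_umlaut : Prop := ∀ (text : String), Dom_add_umlaut text → Spec_add_umlaut text (add_umlaut text)

-- ===== LEMMAS AND PROOFS =====

-- vowel test / replacement used by the proofs (read off the shared dict)
def pvIsV (c : Char) : Bool := (pvReplB.get? c).isSome
def pvRC (c : Char) : Char := (pvReplB.get? c).getD c

-- positions (0-based) of the vowels of a word
def pvVIdx : List Char → List Nat
  | [] => []
  | c :: cs => if pvIsV c then 0 :: (pvVIdx cs).map (· + 1) else (pvVIdx cs).map (· + 1)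

-- "replace the m-th vowel" (m counts down; m < 0 or too few vowels: unchanged)
def pvRAt (m : Int) : List Char → List Char
  | [] => []
  | c :: cs => if pvIsV c then (if m = 0 then pvRC c :: cs else c :: pvRAt (m - 1) cs)
               else c :: pvRAt m cs

-- A's loop as a pure function of the remaining text and the counter
def pvF (k : Int) : List Char → List Char
  | [] => []
  | c :: cs =>
    let k1 : Int := if c = ' ' then 0 else k
    match pvReplA.get? c with
    | some v => (if k1 + 1 = 2 then v else c) :: pvF (k1 + 1) cs
    | none => c :: pvF k1 cs

-- text.split(" ") as a structural recursion
def pvSplitSp : List Char → List (List Char)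
  | [] => [[]]
  | c :: cs => if c = ' ' then [] :: pvSplitSp cs else (pvSplitSp cs).modifyHead (c :: ·)

theorem pvSplitSp_ne_nil (cs : List Char) : pvSplitSp cs ≠ [] := by
  cases cs with
  | nil => simp [pvSplitSp]
  | cons c cs =>
    simp only [pvSplitSp]
    split_ifs
    · simp
    · cases h : pvSplitSp cs with
      | nil => exact absurd h (pvSplitSp_ne_nil cs)
      | cons w ws => simp

theorem pvGo_eq (sep : List Char) (hsep : sep = [' ']) :
    ∀ (fuel : Nat) (l : List Char), l.length < fuel → ∀ (cur : List Char) (acc : List (List Char)),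
      PySem.Chars.splitOn.go sep fuel l cur acc
        = acc.reverse ++ (pvSplitSp l).modifyHead (cur.reverse ++ ·) := by
  subst hsep
  intro fuel
  induction fuel with
  | zero => intro l h; exact absurd h (Nat.not_lt_zero _)
  | succ fuel ih =>
    intro l h cur acc
    cases l with
    | nil => simp [PySem.Chars.splitOn.go, pvSplitSp]
    | cons c rest =>
      simp only [PySem.Chars.splitOn.go]
      by_cases hc : c = ' '
      · subst hc
        rw [if_pos (by simp)]
        simp only [List.length_cons, List.length_nil, List.drop_succ_cons, List.drop_zero]
        rw [ih rest (by simpa using Nat.lt_of_succ_lt_succ h) [] (cur.reverse :: acc)]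
        simp only [pvSplitSp, List.reverse_cons, List.append_assoc,
          List.singleton_append]
        cases pvSplitSp rest <;> simp
      · rw [if_neg (by simp [List.isPrefixOf]; exact fun hh => hc hh.symm)]
        rw [ih rest (by simpa using Nat.lt_of_succ_lt_succ h) (c :: cur) acc]
        simp only [pvSplitSp, if_neg hc]
        cases hs : pvSplitSp rest with
        | nil => exact absurd hs (pvSplitSp_ne_nil rest)
        | cons w ws => simp

theorem pvSplitOn_eq (cs : List Char) : PySem.Chars.splitOn cs [' '] = pvSplitSp cs := by
  rw [PySem.Chars.splitOn, pvGo_eq [' '] rfl (cs.length + 1) cs (by omega) [] []]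
  cases hs : pvSplitSp cs with
  | nil => exact absurd hs (pvSplitSp_ne_nil cs)
  | cons w ws => simp

theorem pvFoldA (cs : List Char) : ∀ (out : List Char) (k : Int),
    (cs.foldl pvStepA (out, k)).1 = out ++ pvF k cs := by
  induction cs with
  | nil => intro out k; simp [pvF]
  | cons c cs ih =>
    intro out k
    simp only [List.foldl_cons, pvF, pvStepA]
    cases h : pvReplA.get? c with
    | none => rw [ih]; simp
    | some v => split_ifs with h1 h2 h2 <;> simp_all [List.append_assoc]

theorem pvJoin_cons_head (x : Char) (p : List Char) (rest : List (List Char)) :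
    PySem.Chars.join [' '] ((x :: p) :: rest) = x :: PySem.Chars.join [' '] (p :: rest) := by
  cases rest with
  | nil => simp [PySem.Chars.join_singleton]
  | cons q rest => simp [PySem.Chars.join_cons_cons]

theorem pvRepl_eq : pvReplA = pvReplB := rfl

theorem pvRAt_neg (cs : List Char) : ∀ (m : Int), m < 0 → pvRAt m cs = cs := by
  induction cs with
  | nil => intro m _; rfl
  | cons c cs ih =>
    intro m hm
    simp only [pvRAt]
    split_ifs with h1 h2
    · omega
    · rw [ih (m - 1) (by omega)]
    · rw [ih m hm]

theorem pvMain (cs : List Char) : ∀ (k : Int) (w : List Char) (ws : List (List Char)),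
    pvSplitSp cs = w :: ws →
    pvF k cs = PySem.Chars.join [' '] (pvRAt (1 - k) w :: ws.map (pvRAt 1)) := by
  induction cs with
  | nil =>
    intro k w ws hsp
    simp only [pvSplitSp] at hsp
    injection hsp with h1 h2
    subst h1; subst h2
    simp [pvF, pvRAt, PySem.Chars.join_singleton]
  | cons c cs ih =>
    intro k w ws hsp
    by_cases hc : c = ' '
    · subst hc
      rw [show pvSplitSp (' ' :: cs) = [] :: pvSplitSp cs from by simp [pvSplitSp]] at hsp
      injection hsp with h1 h2
      subst h1; subst h2
      cases hs : pvSplitSp cs with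
      | nil => exact absurd hs (pvSplitSp_ne_nil cs)
      | cons w' ws' =>
        rw [show pvF k (' ' :: cs) = ' ' :: pvF 0 cs from by simp [pvF]; rfl]
        rw [ih 0 w' ws' hs]
        simp [pvRAt, PySem.Chars.join_cons_cons]
    · rw [show pvSplitSp (c :: cs) = (pvSplitSp cs).modifyHead (c :: ·) from by
        simp [pvSplitSp, hc]] at hsp
      cases hs : pvSplitSp cs with
      | nil => exact absurd hs (pvSplitSp_ne_nil cs)
      | cons w0 ws0 =>
        rw [hs] at hsp
        simp only [List.modifyHead_cons] at hsp
        injection hsp with h1 h2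
        subst h1; subst h2
        cases hv : pvReplA.get? c with
        | none =>
          have hV : pvIsV c = false := by simp [pvIsV, ← pvRepl_eq, hv]
          rw [show pvF k (c :: cs) = c :: pvF k cs from by simp [pvF, hc, hv]]
          rw [ih k w0 ws0 hs]
          simp only [pvRAt, hV, Bool.false_eq_true, if_false]
          rw [pvJoin_cons_head]
        | some v =>
          have hV : pvIsV c = true := by simp [pvIsV, ← pvRepl_eq, hv]
          have hRC : pvRC c = v := by simp [pvRC, ← pvRepl_eq, hv]
          by_cases hk : k = 1
          · subst hk
            rw [show pvF 1 (c :: cs) = v :: pvF 2 cs from by norm_num [pvF, hc, hv]]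
            rw [ih 2 w0 ws0 hs]
            simp only [pvRAt, hV, hRC, if_true]
            rw [show (1 : Int) - 1 = 0 from by norm_num, if_pos rfl]
            rw [pvRAt_neg w0 (1 - 2) (by omega), pvJoin_cons_head]
          · rw [show pvF k (c :: cs) = c :: pvF (k + 1) cs from by
              simp only [pvF, hc, if_false, hv]
              rw [if_neg (by omega)]]
            rw [ih (k + 1) w0 ws0 hs]
            simp only [pvRAt, hV, if_true, if_neg (show (1 : Int) - k ≠ 0 by omega)]
            rw [pvJoin_cons_head]
            have h3 : (1 : Int) - (k + 1) = 1 - k - 1 := by ring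
            rw [h3]

theorem pvIdxs_eq (w : List Char) : ∀ (s : Int),
    ((PySem.List.enumerate w s).filter (fun p => (pvReplB.get? p.2).isSome)).map (·.1)
      = (pvVIdx w).map (fun (j : Nat) => s + (j : Int)) := by
  induction w with
  | nil => intro s; simp [PySem.List.enumerate, pvVIdx]
  | cons c cs ih =>
    intro s
    rw [PySem.List.enumerate_cons]
    simp only [List.filter_cons]
    cases hV : pvIsV c with
    | true =>
      rw [if_pos (by simpa [pvIsV] using hV)]
      simp only [pvVIdx, hV, if_true, List.map_cons, List.map_map]
      refine congrArg₂ _ (by norm_num) ?_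
      rw [ih (s + 1)]
      refine List.map_congr_left (fun j _ => ?_)
      simp only [Function.comp_apply]
      push_cast
      ring
    | false =>
      rw [if_neg (by simpa [pvIsV] using hV)]
      simp only [pvVIdx, hV, Bool.false_eq_true, if_false, List.map_map]
      rw [ih (s + 1)]
      refine List.map_congr_left (fun j _ => ?_)
      simp only [Function.comp_apply]
      push_cast
      ring

theorem pvRAt_at (cs : List Char) : ∀ (m jn : Nat), (pvVIdx cs)[m]? = some jn →
    ∃ hlt : jn < cs.length, pvIsV cs[jn] = true ∧
      pvRAt (m : Int) cs = cs.take jn ++ pvRC cs[jn] :: cs.drop (jn + 1) := by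
  induction cs with
  | nil => intro m jn h; simp [pvVIdx] at h
  | cons c cs ih =>
    intro m jn h
    cases hV : pvIsV c with
    | true =>
      rw [show pvVIdx (c :: cs) = 0 :: (pvVIdx cs).map (· + 1) from by simp [pvVIdx, hV]] at h
      cases m with
      | zero =>
        simp only [List.getElem?_cons_zero, Option.some.injEq] at h
        subst h
        refine ⟨by simp, by simpa using hV, ?_⟩
        simp [pvRAt, hV]
      | succ m =>
        simp only [List.getElem?_cons_succ, List.getElem?_map] at h
        cases h' : (pvVIdx cs)[m]? with
        | none => rw [h'] at h; simp at h
        | some j' =>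
          rw [h'] at h
          simp only [Option.map_some, Option.some.injEq] at h
          subst h
          obtain ⟨hlt, hv', heq⟩ := ih m j' h'
          refine ⟨by simpa using Nat.succ_lt_succ hlt, by simpa using hv', ?_⟩
          rw [show pvRAt ((m + 1 : Nat) : Int) (c :: cs) = c :: pvRAt ((m : Nat) : Int) cs from by
            simp only [pvRAt, hV, if_true]
            rw [if_neg (by push_cast; omega)]
            congr 1
            congr 1
            push_cast; ring]
          rw [heq]
          simp [List.take_succ_cons, List.drop_succ_cons]
    | false =>
      rw [show pvVIdx (c :: cs) = (pvVIdx cs).map (· + 1) from by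
        simp [pvVIdx, hV]] at h
      simp only [List.getElem?_map] at h
      cases h' : (pvVIdx cs)[m]? with
      | none => rw [h'] at h; simp at h
      | some j' =>
        rw [h'] at h
        simp only [Option.map_some, Option.some.injEq] at h
        subst h
        obtain ⟨hlt, hv', heq⟩ := ih m j' h'
        refine ⟨by simpa using Nat.succ_lt_succ hlt, by simpa using hv', ?_⟩
        rw [show pvRAt ((m : Nat) : Int) (c :: cs) = c :: pvRAt ((m : Nat) : Int) cs from by
          simp [pvRAt, hV]]
        rw [heq]
        simp [List.take_succ_cons, List.drop_succ_cons]

theorem pvRAt_short (cs : List Char) : ∀ (m : Nat), (pvVIdx cs).length ≤ m →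
    pvRAt (m : Int) cs = cs := by
  induction cs with
  | nil => intro m _; rfl
  | cons c cs ih =>
    intro m hm
    cases hV : pvIsV c with
    | true =>
      rw [show pvVIdx (c :: cs) = 0 :: (pvVIdx cs).map (· + 1) from by simp [pvVIdx, hV]] at hm
      simp only [List.length_cons, List.length_map] at hm
      obtain ⟨m', rfl⟩ : ∃ m', m = m' + 1 := ⟨m - 1, by omega⟩
      rw [show pvRAt ((m' + 1 : Nat) : Int) (c :: cs) = c :: pvRAt ((m' : Nat) : Int) cs from by
        simp only [pvRAt, hV, if_true]
        rw [if_neg (by push_cast; omega)]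
        congr 1
        congr 1
        push_cast; ring]
      rw [ih m' (by omega)]
    | false =>
      rw [show pvVIdx (c :: cs) = (pvVIdx cs).map (· + 1) from by simp [pvVIdx, hV]] at hm
      simp only [List.length_map] at hm
      rw [show pvRAt ((m : Nat) : Int) (c :: cs) = c :: pvRAt ((m : Nat) : Int) cs from by
        simp [pvRAt, hV]]
      rw [ih m hm]

theorem pvFix_eq (w : List Char) : pvFixB w = pvRAt 1 w := by
  unfold pvFixB
  have hid : ((PySem.List.enumerate w 0).filter (fun p => (pvReplB.get? p.2).isSome)).map (·.1)
      = (pvVIdx w).map (fun (j : Nat) => (j : Int)) := by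
    rw [pvIdxs_eq w 0]
    exact List.map_congr_left (fun j _ => by ring)
  rw [hid]
  cases h1 : (pvVIdx w)[1]? with
  | none =>
    have hlen : (pvVIdx w).length ≤ 1 := by
      by_contra hcon
      exact absurd h1 (by simp [List.getElem?_eq_getElem (by omega : 1 < (pvVIdx w).length)])
    rw [if_pos (by simpa using by omega : ((pvVIdx w).map (fun (j : Nat) => (j : Int))).length < 2)]
    rw [show (1 : Int) = ((1 : Nat) : Int) from rfl, pvRAt_short w 1 hlen]
  | some jn =>
    have hlen : 1 < (pvVIdx w).length := by
      by_contra hcon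
      rw [List.getElem?_eq_none (by omega)] at h1
      simp at h1
    rw [if_neg (by simpa using by omega)]
    obtain ⟨hlt, hV, heq⟩ := pvRAt_at w 1 jn h1
    rw [Nat.cast_one] at heq
    have hpy1 : PySem.List.pyGet? ((pvVIdx w).map (fun (j : Nat) => (j : Int))) 1
        = some (jn : Int) := by
      rw [show (1 : Int) = ((1 : Nat) : Int) from rfl, PySem.List.pyGet?_natCast,
        List.getElem?_map, h1, Option.map_some]
    rw [hpy1]
    dsimp only
    rw [PySem.List.pyGet?_natCast, List.getElem?_eq_getElem hlt]
    dsimp only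
    cases hg : pvReplB.get? w[jn] with
    | none => simp [pvIsV, hg] at hV
    | some u =>
      have hRC : pvRC w[jn] = u := by simp [pvRC, hg]
      dsimp only
      rw [PySem.List.slice_to_natCast]
      rw [show ((jn : Int) + 1) = ((jn + 1 : Nat) : Int) from by push_cast; ring,
        PySem.List.slice_from_natCast]
      rw [heq, hRC]
      simp

-- ===== VERDICT (by name: the statement is the Claim_ definition above) =====
theorem add_umlaut_spec : Claim_equal_add_umlaut := by
  intro text _
  unfold Spec_add_umlaut add_umlaut add_umlaut_alt
  have hsep : (" " : String).toList = [' '] := rfl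
  have hsplit : PySem.Str.split? text " "
      = some ((pvSplitSp text.toList).map String.ofList) := by
    rw [PySem.Str.split?, hsep, PySem.Chars.split?]
    rw [if_neg (by simp)]
    rw [pvSplitOn_eq]
    rfl
  rw [hsplit]
  unfold PySem.Str.join
  rw [hsep]
  congr 1
  rw [pvFoldA text.toList [] 0, List.nil_append]
  cases hs : pvSplitSp text.toList with
  | nil => exact absurd hs (pvSplitSp_ne_nil text.toList)
  | cons w ws =>
    rw [pvMain text.toList 0 w ws hs]
    simp only [List.map_map, List.map_cons, String.toList_ofList, pvFix_eq]
    norm_num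
    refine congrArg _ (congrArg _ ?_)
    symm
    exact List.map_congr_left fun p _ => by simp
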